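-- pv_equiv track=rewrite | github.com/Fizzmy/LAER-MoE-AE | LAER-MoE/galvatron/core/runtime/moe/prefetch/solver.py | default_placement
-- ===== SOURCE A (Python) =====
-- from typing import Tuple, List
--
-- def default_placement(
--                     n_device,
--                     n_expert,
--                     E,
--                     C_e,
--                     ) -> Tuple:
--     """
--     Default placement method
--     """
--     ep_size = n_expert // C_e
--     A_res = []
--     for j in range(n_device):
--         tmp = []
--         for i in range(C_e):
--             tmp.append(i * ep_size + (j % ep_size))
--         A_res.append(tmp)
--
--     return 0, 0, A_res
-- ===== SOURCE B (Python) =====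
-- def default_placement(n_device, n_expert, E, C_e):
--     ep_size = n_expert // C_e
--     # one flat pass over all n_device*C_e cells, decoding row/column from the flat index
--     n = max(n_device, 0) * max(C_e, 0)
--     flat = [(k % C_e) * ep_size + (k // C_e) % ep_size for k in range(n)]
--     # chunk the flat list into the per-device rows
--     return 0, 0, [flat[s:s + C_e] for s in range(0, n, C_e)]
-- ===== Notes on version B (the rewrite author's own statement) =====
-- stated objective: alternative
-- what changed: B fills the matrix in one flat pass over all n_device*C_e cells, decoding each cell's (row, column) from the flat index with divmod, then chunks the flat list into per-device rows by slicing, instead of A's nested row-by-row loops.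
-- outside the precondition, e.g. on default_placement(1, 5, 0, -2): A returns (0, 0, [[]]), B returns (0, 0, []); on default_placement(3, 7, 0, -1): A returns (0, 0, [[], [], []]), B returns (0, 0, [])
import Mathlib
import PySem

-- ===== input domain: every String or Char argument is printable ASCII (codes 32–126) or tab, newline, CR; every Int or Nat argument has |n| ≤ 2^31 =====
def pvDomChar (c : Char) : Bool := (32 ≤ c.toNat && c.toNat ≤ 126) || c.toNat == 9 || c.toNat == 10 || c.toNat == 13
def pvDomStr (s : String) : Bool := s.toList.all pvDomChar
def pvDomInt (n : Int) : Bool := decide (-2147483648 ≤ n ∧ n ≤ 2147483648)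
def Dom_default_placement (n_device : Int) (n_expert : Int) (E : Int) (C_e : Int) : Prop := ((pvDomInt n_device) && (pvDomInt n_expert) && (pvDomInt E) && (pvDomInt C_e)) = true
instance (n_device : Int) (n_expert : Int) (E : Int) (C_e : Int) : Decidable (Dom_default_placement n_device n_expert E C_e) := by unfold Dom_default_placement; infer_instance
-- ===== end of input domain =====

-- B fills the matrix in ONE flat pass over all n_device*C_e cells, decoding (row, column) from
-- the flat index with divmod, then chunks the flat list into per-device rows by slicing
-- (alternative decomposition; same cost).

-- ===== PORT A =====
def default_placement (n_device : Int) (n_expert : Int) (E : Int) (C_e : Int) : Int × Int × List (List Int) :=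
  let ep_size := PySem.Int.floordiv n_expert C_e
  let A_res := (PySem.List.pyRange 0 n_device 1).foldl (fun A_res j =>
    let tmp := (PySem.List.pyRange 0 C_e 1).foldl (fun tmp i =>
      tmp ++ [i * ep_size + PySem.Int.mod j ep_size]) []
    A_res ++ [tmp]) []
  (0, 0, A_res)

-- ===== PORT B =====
def default_placement_alt (n_device : Int) (n_expert : Int) (E : Int) (C_e : Int) : Int × Int × List (List Int) :=
  let ep_size := PySem.Int.floordiv n_expert C_e
  let n := max n_device 0 * max C_e 0
  let flat := (PySem.List.pyRange 0 n 1).map (fun k =>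
    PySem.Int.mod k C_e * ep_size + PySem.Int.mod (PySem.Int.floordiv k C_e) ep_size)
  (0, 0, (PySem.List.pyRange 0 n C_e).map (fun s => PySem.List.slice flat (some s) (some (s + C_e))))

-- ===== PRECONDITION & SPEC =====
-- Pre_ excludes C_e = 0 and, when the device loop runs (n_device > 0), ep_size = 0 — there A (and B)
-- raise ZeroDivisionError at the '% ep_size' — and C_e < 0: there A returns n_device empty rows
-- (range(C_e) is empty, a degenerate configuration) while B's flat pass over zero cells yields no rows.
def Pre_default_placement (n_device : Int) (n_expert : Int) (E : Int) (C_e : Int) : Prop :=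
  C_e ≠ 0 ∧ (n_device ≤ 0 ∨ (0 < C_e ∧ PySem.Int.floordiv n_expert C_e ≠ 0))
instance (n_device : Int) (n_expert : Int) (E : Int) (C_e : Int) : Decidable (Pre_default_placement n_device n_expert E C_e) := by unfold Pre_default_placement; infer_instance
def pvWitness_default_placement : Int × Int × Int × Int := (5, 6, 0, 2)

def Spec_default_placement (n_device : Int) (n_expert : Int) (E : Int) (C_e : Int) (out : Int × Int × List (List Int)) : Prop := out = default_placement_alt n_device n_expert E C_e
instance (n_device : Int) (n_expert : Int) (E : Int) (C_e : Int) (out : Int × Int × List (List Int)) : Decidable (Spec_default_placement n_device n_expert E C_e out) := by unfold Spec_default_placement; infer_instance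

-- ===== CLAIM (what is proved, stated in full; the proofs are below) =====
def Claim_equal_default_placement : Prop := ∀ (n_device : Int) (n_expert : Int) (E : Int) (C_e : Int), Dom_default_placement n_device n_expert E C_e → Pre_default_placement n_device n_expert E C_e → Spec_default_placement n_device n_expert E C_e (default_placement n_device n_expert E C_e)

-- ===== LEMMAS AND PROOFS =====

-- B's chunk starting at the multiple C_e*u of C_e is exactly A's row u
lemma pvChunk_eq_row (nd ce ep : Int) (hnd : 0 < nd) (hc : 0 < ce) (u : Nat) (hu : u < nd.toNat) :
    PySem.List.slice
      ((PySem.List.pyRange 0 (nd * ce) 1).map (fun k =>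
        PySem.Int.mod k ce * ep + PySem.Int.mod (PySem.Int.floordiv k ce) ep))
      (some (ce * u)) (some (ce * u + ce))
      = (PySem.List.pyRange 0 ce 1).map (fun i => i * ep + PySem.Int.mod (u : Int) ep) := by
  have hu' : ((u : Int) + 1) ≤ nd := by omega
  have h0s : (0:Int) ≤ ce * u := by positivity
  have hse : ce * (u : Int) + ce ≤ nd * ce := by nlinarith
  -- split the flat range at the chunk boundaries
  rw [PySem.List.pyRange_one_append 0 (ce * u) (nd * ce) h0s (by omega),
      PySem.List.pyRange_one_append (ce * u) (ce * u + ce) (nd * ce) (by omega) hse,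
      List.map_append, List.map_append,
      PySem.List.slice_toNat _ h0s (by omega),
      List.drop_left' (by simp [PySem.List.length_pyRange_one]),
      List.take_left' (by simp [PySem.List.length_pyRange_one]; omega)]
  -- reindex both ranges over List.range ce.toNat
  rw [PySem.List.pyRange_one (ce * u) (ce * u + ce), PySem.List.pyRange_one 0 ce]
  simp only [add_sub_cancel_left, sub_zero, List.map_map]
  apply List.map_congr_left
  intro k hk
  rw [List.mem_range] at hk
  have hkc : (k : Int) < ce := by omega
  simp only [Function.comp_apply, zero_add]
  have hmod : PySem.Int.mod (ce * (u : Int) + (k : Int)) ce = (k : Int) := by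
    rw [PySem.Int.mod_eq_emod_of_pos hc, mul_comm, add_comm]
    simp [Int.add_mul_emod_self_right]
    exact Int.emod_eq_of_lt (by omega) hkc
  have hdiv : PySem.Int.floordiv (ce * (u : Int) + (k : Int)) ce = (u : Int) := by
    rw [PySem.Int.floordiv_eq_iff_of_pos hc]
    constructor
    · nlinarith
    · nlinarith
  rw [hmod, hdiv]

-- ===== VERDICT (by name: the statement is the Claim_ definition above) =====
theorem default_placement_spec : Claim_equal_default_placement := by
  intro n_device n_expert E C_e _hDom hPre
  obtain ⟨hC, hEp⟩ := hPre
  unfold Spec_default_placement default_placement default_placement_alt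
  simp only [Prod.mk.injEq, true_and]
  rw [PySem.List.foldl_append_singleton_eq_map]
  by_cases hnd : n_device ≤ 0
  · -- no devices: both sides are []
    rw [PySem.List.pyRange_one_eq_nil hnd, List.map_nil, max_eq_right hnd, zero_mul]
    simp [PySem.List.pyRange]
  · replace hnd : 0 < n_device := by omega
    obtain ⟨hc, -⟩ : 0 < C_e ∧ PySem.Int.floordiv n_expert C_e ≠ 0 := by
      rcases hEp with h | h
      · omega
      · exact h
    rw [max_eq_left hnd.le, max_eq_left hc.le, List.nil_append]
    -- the chunk starts are 0, C_e, …, (n_device-1)*C_e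
    have hcount : ((n_device * C_e - 0 + C_e - 1) / C_e).toNat = n_device.toNat := by
      have h1 : n_device * C_e - 0 + C_e - 1 = (C_e - 1) + n_device * C_e := by ring
      rw [h1, Int.add_mul_ediv_right _ _ (ne_of_gt hc),
        Int.ediv_eq_zero_of_lt (by omega) (by omega), zero_add]
    rw [PySem.List.pyRange_of_pos 0 (n_device * C_e) hc,
      if_pos (by positivity : (0:Int) < n_device * C_e), hcount,
      PySem.List.pyRange_one 0 n_device]
    simp only [sub_zero, List.map_map]
    apply List.map_congr_left
    intro u hu
    rw [List.mem_range] at hu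
    simp only [Function.comp_apply, zero_add]
    rw [PySem.List.foldl_append_singleton_eq_map, List.nil_append,
      pvChunk_eq_row n_device C_e _ hnd hc u hu]
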